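-- pv_equiv track=rewrite | github.com/RyanJones19/AdventOfCode | 2023/day14.py | performShift
-- ===== SOURCE A (Python) =====
-- def getRocksinRow(row: [str]) -> int:
--     return row.count('O')
--
-- def shiftRocksInSplit(split: str) -> str:
--     rocksInSplit = getRocksinRow(split)
--     return 'O' * rocksInSplit + '.' * (len(split) - rocksInSplit)
--
-- def performShift(grid: [[str]]) -> [[str]]:
--     for i, row in enumerate(grid):
--         stringifiedRow = ''.join(row)
--         rockSplit = stringifiedRow.split('#')
--         newRow = []
--         for split in rockSplit:
--             newRow.append(shiftRocksInSplit(split))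
--         grid[i] = list('#'.join(newRow))
--
--     return grid
-- ===== SOURCE B (Python) =====
-- def performShift(grid: [[str]]) -> [[str]]:
--     # One left-to-right pass per row with two counters (O-count and segment
--     # length) instead of split/count/rejoin.  Same in-place row reassignment.
--     for i, row in enumerate(grid):
--         new = []
--         nO = 0
--         seg = 0
--         for c in ''.join(row):
--             if c == '#':
--                 new += ['O'] * nO + ['.'] * (seg - nO) + ['#']
--                 nO = 0
--                 seg = 0
--             else:
--                 seg += 1
--                 if c == 'O':
--                     nO += 1
--         new += ['O'] * nO + ['.'] * (seg - nO)
--         grid[i] = new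
--     return grid
-- ===== Notes on version B (the rewrite author's own statement) =====
-- stated objective: alternative
-- what changed: Replaces the split-on-'#'/count/rejoin pipeline with a single left-to-right scan per row that carries an O-count and a segment-length counter and emits each shifted segment when it hits a '#' or the row end.
import Mathlib
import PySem

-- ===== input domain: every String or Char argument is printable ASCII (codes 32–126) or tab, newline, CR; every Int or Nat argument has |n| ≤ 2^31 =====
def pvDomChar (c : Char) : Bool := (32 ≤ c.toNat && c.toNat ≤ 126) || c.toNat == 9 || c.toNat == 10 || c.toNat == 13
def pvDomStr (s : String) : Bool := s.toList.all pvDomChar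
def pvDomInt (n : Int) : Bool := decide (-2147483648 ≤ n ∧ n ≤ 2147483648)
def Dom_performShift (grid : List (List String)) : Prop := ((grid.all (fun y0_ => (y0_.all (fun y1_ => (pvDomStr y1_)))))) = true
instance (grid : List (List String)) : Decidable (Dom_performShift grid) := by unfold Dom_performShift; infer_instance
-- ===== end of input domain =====

-- B replaces A's split-on-'#'/count/rejoin with a single per-row scan carrying an
-- O-count and a segment-length counter (alternative decomposition, same cost).
-- Both Pythons reassign grid[i] in place and return grid; the theorems below are
-- about the RETURN value (the in-place effect is the same full-row reassignment).

-- ===== PORT A =====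
-- row.count('O')  (str.count of the single-char substring 'O')
def getRocksinRow (row : List Char) : Nat := PySem.Chars.count row ['O']

-- 'O' * k + '.' * (len(split) - k); k ≥ 0 so str*int is List.replicate
def shiftRocksInSplit (split : List Char) : List Char :=
  let rocksInSplit := getRocksinRow split
  List.replicate rocksInSplit 'O' ++ List.replicate (split.length - rocksInSplit) '.'

def performShift (grid : List (List String)) : List (List String) :=
  grid.map (fun row =>
    let stringifiedRow := PySem.Chars.join [] (row.map String.toList)  -- ''.join(row)
    let rockSplit := PySem.Chars.splitOn stringifiedRow ['#']          -- .split('#')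
    let newRow := rockSplit.foldl (fun acc s => acc ++ [shiftRocksInSplit s]) []
    (PySem.Chars.join ['#'] newRow).map (fun c => String.mk [c]))      -- list('#'.join(newRow))

-- ===== PORT B =====
-- new += ['O']*nO + ['.']*(seg-nO) (+ ['#'])
def pvFlush (nO seg : Nat) : List Char :=
  List.replicate nO 'O' ++ List.replicate (seg - nO) '.'

-- the per-row loop of Source B: one pass with counters nO, seg
def pvScanRow : List Char → Nat → Nat → List Char
  | [], nO, seg => pvFlush nO seg
  | c :: rest, nO, seg =>
    if c = '#' then pvFlush nO seg ++ '#' :: pvScanRow rest 0 0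
    else pvScanRow rest (if c = 'O' then nO + 1 else nO) (seg + 1)

def performShift_alt (grid : List (List String)) : List (List String) :=
  grid.map (fun row =>
    (pvScanRow (row.flatMap String.toList) 0 0).map (fun c => String.mk [c]))

-- ===== PRECONDITION & SPEC =====
def Spec_performShift (grid : List (List String)) (out : List (List String)) : Prop := out = performShift_alt grid
instance (grid : List (List String)) (out : List (List String)) : Decidable (Spec_performShift grid out) := by unfold Spec_performShift; infer_instance

-- ===== CLAIM (what is proved, stated in full; the proofs are below) =====
def Claim_equal_performShift : Prop := ∀ (grid : List (List String)), Dom_performShift grid → Spec_performShift grid (performShift grid)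

-- ===== LEMMAS AND PROOFS =====

-- str.count of a single-character substring is List.count
theorem pvCountGo_singleton (c : Char) : ∀ (fuel : Nat) (l : List Char) (acc : Nat),
    l.length ≤ fuel → PySem.Chars.count.go [c] fuel l acc = acc + l.count c := by
  intro fuel
  induction fuel with
  | zero =>
    intro l acc h
    have : l = [] := List.length_eq_zero_iff.mp (Nat.le_zero.mp h)
    subst this
    rw [PySem.Chars.count.go.eq_def]; simp
  | succ n ih =>
    intro l acc h
    match l with
    | [] => rw [PySem.Chars.count.go.eq_def]; simp
    | x :: rest =>
      have hxc : ¬ x = c → ¬ c = x := fun a b => a b.symm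
      rw [PySem.Chars.count.go.eq_def]
      by_cases hc : c = x
      · subst hc
        simp only [List.isPrefixOf, beq_self_eq_true, Bool.and_true, if_true,
          List.length_cons, List.length_nil, List.drop_succ_cons, List.drop_zero]
        rw [ih rest (acc + 1) (by simpa using h)]
        simp [List.count_cons]
        omega
      · have hpre : ([c].isPrefixOf (x :: rest)) = false := by
          simp [List.isPrefixOf, hc]
        simp only [hpre, if_false]
        rw [ih rest acc (by simpa using h)]
        simp [List.count_cons, hc, hxc]
        exact fun h' => hc h'.symm

theorem pvCount_singleton (s : List Char) (c : Char) :
    PySem.Chars.count s [c] = s.count c := by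
  rw [PySem.Chars.count]
  simp only [List.isEmpty, Bool.false_eq_true, if_false]
  rw [pvCountGo_singleton c s.length s 0 (Nat.le_refl _)]
  omega

-- split on '#' as a structural recursion (proof-side model of splitOn)
def pvSplitH : List Char → List Char → List (List Char)
  | pre, [] => [pre]
  | pre, c :: rest => if c = '#' then pre :: pvSplitH [] rest else pvSplitH (pre ++ [c]) rest

theorem pvSplitOnGo_spec : ∀ (fuel : Nat) (l cur : List Char) (acc : List (List Char)),
    l.length < fuel →
    PySem.Chars.splitOn.go ['#'] fuel l cur acc = acc.reverse ++ pvSplitH cur.reverse l := by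
  intro fuel
  induction fuel with
  | zero => intro l cur acc h; omega
  | succ n ih =>
    intro l cur acc h
    match l with
    | [] => rw [PySem.Chars.splitOn.go.eq_def]; simp [pvSplitH]
    | x :: rest =>
      rw [PySem.Chars.splitOn.go.eq_def]
      by_cases hx : x = '#'
      · subst hx
        simp only [List.isPrefixOf, beq_self_eq_true, Bool.and_true, if_true,
          List.length_cons, List.length_nil, List.drop_succ_cons, List.drop_zero]
        rw [ih rest [] (cur.reverse :: acc) (by simpa using h)]
        simp [pvSplitH]
      · have : (['#'].isPrefixOf (x :: rest)) = false := by
          simp [List.isPrefixOf]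
          exact fun h' => absurd h'.symm hx
        simp only [this, if_false]
        rw [ih rest (x :: cur) acc (by simpa using h)]
        simp [pvSplitH, hx]

theorem pvSplitOn_eq (l : List Char) :
    PySem.Chars.splitOn l ['#'] = pvSplitH [] l := by
  rw [PySem.Chars.splitOn]
  rw [pvSplitOnGo_spec (l.length + 1) l [] [] (by omega)]
  simp

theorem pvSplitH_ne_nil : ∀ (l pre : List Char), pvSplitH pre l ≠ [] := by
  intro l
  induction l with
  | nil => intro pre; simp [pvSplitH]
  | cons c rest ih =>
    intro pre
    by_cases hc : c = '#' <;> simp [pvSplitH, hc] <;> exact ih _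

theorem pvShift_eq_flush (s : List Char) :
    shiftRocksInSplit s = pvFlush (s.count 'O') s.length := by
  simp [shiftRocksInSplit, getRocksinRow, pvFlush, pvCount_singleton]

-- the one-pass scan computes exactly join('#', map(shift, split('#', l)))
theorem pvScan_main : ∀ (l pre : List Char),
    pvScanRow l (pre.count 'O') pre.length
      = PySem.Chars.join ['#'] ((pvSplitH pre l).map shiftRocksInSplit) := by
  intro l
  induction l with
  | nil =>
    intro pre
    simp [pvSplitH, pvScanRow, PySem.Chars.join_singleton, pvShift_eq_flush]
  | cons c rest ih =>
    intro pre
    by_cases hc : c = '#'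
    · subst hc
      obtain ⟨q, qs, hq⟩ : ∃ q qs, pvSplitH ([] : List Char) rest = q :: qs := by
        cases hsp : pvSplitH ([] : List Char) rest with
        | nil => exact absurd hsp (pvSplitH_ne_nil rest [])
        | cons q qs => exact ⟨q, qs, rfl⟩
      have h0 := ih []
      simp only [List.count_nil, List.length_nil] at h0
      simp only [pvScanRow, pvSplitH, if_true, List.map_cons, hq]
      rw [PySem.Chars.join_cons_cons]
      rw [h0, hq]
      simp [pvShift_eq_flush]
    · have hcount : (pre ++ [c]).count 'O' = (if c = 'O' then pre.count 'O' + 1 else pre.count 'O') := by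
        simp [List.count_append]
        by_cases h' : c = 'O' <;> simp [h']
      have hlen : (pre ++ [c]).length = pre.length + 1 := by simp
      simp only [pvScanRow, pvSplitH, hc, if_false]
      rw [show (if c = 'O' then pre.count 'O' + 1 else pre.count 'O') = (pre ++ [c]).count 'O' from hcount.symm]
      rw [show pre.length + 1 = (pre ++ [c]).length from hlen.symm]
      exact ih (pre ++ [c])

-- ''.join(row) is row.flatMap toList
theorem pvJoinNil (l : List (List Char)) : PySem.Chars.join [] l = l.flatten := by
  rw [PySem.Chars.join, List.intercalate]
  induction l with
  | nil => rfl
  | cons a t ih =>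
    cases t with
    | nil => rfl
    | cons b u => simp_all [List.intersperse]

-- ===== VERDICT (by name: the statement is the Claim_ definition above) =====
theorem performShift_spec : Claim_equal_performShift := by
  intro grid _
  unfold Spec_performShift performShift performShift_alt
  apply List.map_congr_left
  intro row _
  simp only []
  rw [pvJoinNil, pvSplitOn_eq]
  rw [PySem.List.foldl_append_singleton_eq_map]
  have hmain := (pvScan_main ((row.map String.toList).flatten) []).symm
  simp only [List.count_nil, List.length_nil] at hmain
  rw [List.nil_append, hmain]
  rfl
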